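-- pv_equiv track=rewrite | github.com/Ezdies/CodeWars | python/Kata6/consonantValue.py | splitOnVowels
-- ===== SOURCE A (Python) =====
-- def splitOnVowels(word):
--     splittedWords = []
--     splittedWord = ""
--     for letter in word:
--         if letter not in "aeiou":
--             splittedWord += letter
--         else:
--             if splittedWord:
--                 splittedWords.append(splittedWord)
--             splittedWord = ""
--     if splittedWord:
--         splittedWords.append(splittedWord)
--     return splittedWords
-- ===== SOURCE B (Python) =====
-- import re
--
-- def splitOnVowels(word):
--     return [s for s in re.split('[aeiou]', word) if s]
-- ===== Notes on version B (the rewrite author's own statement) =====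
-- stated objective: idiomatic
-- what changed: Replaced the manual accumulator loop with re.split on the vowel class followed by filtering out empty fragments.
import Mathlib
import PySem

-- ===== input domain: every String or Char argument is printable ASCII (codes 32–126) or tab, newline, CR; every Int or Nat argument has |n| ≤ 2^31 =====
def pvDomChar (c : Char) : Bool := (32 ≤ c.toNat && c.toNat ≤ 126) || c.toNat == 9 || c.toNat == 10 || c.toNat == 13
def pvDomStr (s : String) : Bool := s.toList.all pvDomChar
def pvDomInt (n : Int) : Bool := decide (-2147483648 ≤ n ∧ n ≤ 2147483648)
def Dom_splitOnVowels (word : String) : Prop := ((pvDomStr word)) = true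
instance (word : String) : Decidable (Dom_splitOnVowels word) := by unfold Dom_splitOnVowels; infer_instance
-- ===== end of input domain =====

-- B replaces A's manual accumulator loop with a split-at-vowels-then-drop-empties strategy (re.split in Python, List.splitOnP here); same cost, more idiomatic.

-- ===== PORT A =====
-- the for-loop of A: state = (splittedWords, splittedWord); after the loop, flush a non-empty splittedWord
def splitOnVowelsLoop (cs : List Char) (words : List String) (cur : List Char) : List String :=
  match cs with
  | [] => if cur.isEmpty then words else words ++ [String.ofList cur]
  | c :: rest =>
      if c ∈ "aeiou".toList then
        splitOnVowelsLoop rest (if cur.isEmpty then words else words ++ [String.ofList cur]) []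
      else
        splitOnVowelsLoop rest words (cur ++ [c])

def splitOnVowels (word : String) : List String :=
  splitOnVowelsLoop word.toList [] []

-- ===== PORT B =====
-- Source B: re.split('[aeiou]', word) = split at every vowel keeping empty fragments; then drop the empties
def splitOnVowels_alt (word : String) : List String :=
  ((word.toList.splitOnP (fun c => c ∈ "aeiou".toList)).filter (fun s => ¬ s.isEmpty)).map String.ofList

-- ===== PRECONDITION & SPEC =====
def Spec_splitOnVowels (word : String) (out : List String) : Prop := out = splitOnVowels_alt word
instance (word : String) (out : List String) : Decidable (Spec_splitOnVowels word out) := by unfold Spec_splitOnVowels; infer_instance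

-- ===== CLAIM (what is proved, stated in full; the proofs are below) =====
def Claim_equal_splitOnVowels : Prop := ∀ (word : String), Dom_splitOnVowels word → Spec_splitOnVowels word (splitOnVowels word)


-- ===== LEMMAS AND PROOFS =====

theorem modifyHead_nil_append (l : List (List Char)) :
    List.modifyHead (fun x => ([] : List Char) ++ x) l = l := by
  cases l <;> simp

-- loop invariant: the A-loop on cs with pending fragment cur emits words, then the nonempty
-- chunks of splitOnP with cur glued onto the first chunk
theorem splitOnVowelsLoop_eq (cs : List Char) (words : List String) (cur : List Char) :
    splitOnVowelsLoop cs words cur =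
      words ++ (((cs.splitOnP (fun c => c ∈ "aeiou".toList)).modifyHead (cur ++ ·)).filter
        (fun s => ¬ s.isEmpty)).map String.ofList := by
  induction cs generalizing words cur with
  | nil =>
      cases cur <;> simp [splitOnVowelsLoop, List.splitOnP_nil]
  | cons c rest ih =>
      rw [List.splitOnP_cons]
      by_cases hv : c ∈ "aeiou".toList
      · have hv' : (decide (c ∈ "aeiou".toList)) = true := by simpa using hv
        rw [if_pos hv']
        have hl : splitOnVowelsLoop (c :: rest) words cur =
            splitOnVowelsLoop rest (if cur.isEmpty then words else words ++ [String.ofList cur]) [] := by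
          simp only [splitOnVowelsLoop, if_pos hv]
        rw [hl, ih, modifyHead_nil_append]
        cases cur <;> simp
      · have hv' : (decide (c ∈ "aeiou".toList)) = false := by simpa using hv
        rw [if_neg (by simpa using hv)]
        have hl : splitOnVowelsLoop (c :: rest) words cur =
            splitOnVowelsLoop rest words (cur ++ [c]) := by
          simp only [splitOnVowelsLoop, if_neg hv]
        rw [hl, ih]
        rcases h : rest.splitOnP (fun c => c ∈ "aeiou".toList) with _ | ⟨hd, tl⟩
        · exact absurd h (List.splitOnP_ne_nil _ _)
        · simp [List.modifyHead]
-- ===== VERDICT (by name: the statement is the Claim_ definition above) =====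
theorem splitOnVowels_spec : Claim_equal_splitOnVowels := by
  intro word _
  unfold Spec_splitOnVowels splitOnVowels splitOnVowels_alt
  rw [splitOnVowelsLoop_eq]
  rcases h : word.toList.splitOnP (fun c => c ∈ "aeiou".toList) with _ | ⟨hd, tl⟩
  · exact absurd h (List.splitOnP_ne_nil _ _)
  · simp [List.modifyHead]
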